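-- pv_equiv track=rewrite | github.com/Tabris-ZX/bocchi | bocchi/plugins/fkmsg/parser.py | _split_content_by_pipe
-- ===== SOURCE A (Python) =====
-- def _split_content_by_pipe(content: str) -> list[str]:
--     parts = []
--     current_part = ""
--     brace_level = 0
--     for char in content:
--         if char == "{":
--             brace_level += 1
--         elif char == "}":
--             brace_level -= 1
--
--         if char == "|" and brace_level == 0:
--             parts.append(current_part.strip())
--             current_part = ""
--         else:
--             current_part += char
--
--     parts.append(current_part.strip())
--     return parts
-- ===== SOURCE B (Python) =====
-- def _split_content_by_pipe(content: str) -> list[str]: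
--     # Index/slice decomposition: track segment start index and slice the
--     # original string at top-level pipes instead of accumulating chars.
--     parts = []
--     start = 0
--     level = 0
--     for i, ch in enumerate(content):
--         if ch == "{":
--             level += 1
--         elif ch == "}":
--             level -= 1
--         elif ch == "|" and level == 0:
--             parts.append(content[start:i].strip())
--             start = i + 1
--     parts.append(content[start:].strip())
--     return parts
-- ===== Notes on version B (the rewrite author's own statement) =====
-- stated objective: alternative
-- what changed: B tracks segment-start indices and slices the original string at top-level pipes (no per-character string accumulation), instead of A's building of each part character by character.
import Mathlib
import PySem

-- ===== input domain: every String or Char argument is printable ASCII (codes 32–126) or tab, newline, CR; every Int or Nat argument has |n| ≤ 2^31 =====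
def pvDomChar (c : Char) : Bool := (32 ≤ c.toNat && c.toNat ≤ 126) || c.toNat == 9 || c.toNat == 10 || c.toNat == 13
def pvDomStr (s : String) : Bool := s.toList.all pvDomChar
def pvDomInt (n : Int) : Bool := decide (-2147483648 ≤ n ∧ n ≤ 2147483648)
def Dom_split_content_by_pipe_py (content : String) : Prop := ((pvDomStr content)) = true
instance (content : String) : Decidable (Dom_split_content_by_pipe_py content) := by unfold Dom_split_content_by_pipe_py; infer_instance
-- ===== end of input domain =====

-- B splits by collecting segment-start indices and slicing the original string; same values as A (alternative decomposition, no speed claim).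

-- ===== PORT A =====
-- A: accumulate the current part character by character; flush (stripped) at top-level '|'.
def pvGoA : List Char → List String → List Char → Int → List String
  | [], parts, current_part, _ =>
      parts ++ [String.ofList (PySem.Chars.strip current_part)]
  | c :: cs, parts, current_part, brace_level =>
      let brace_level' : Int :=
        if c = '{' then brace_level + 1
        else if c = '}' then brace_level - 1
        else brace_level
      if c = '|' ∧ brace_level' = 0 then
        pvGoA cs (parts ++ [String.ofList (PySem.Chars.strip current_part)]) [] brace_level'
      else
        pvGoA cs parts (current_part ++ [c]) brace_level'

def split_content_by_pipe_py (content : String) : List String :=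
  pvGoA content.toList [] [] 0

-- ===== PORT B =====
-- B: walk enumerate(content); at a top-level '|' append the stripped slice content[start:i] and set start := i+1.
def pvGoB (full : List Char) : List (Int × Char) → List String → Int → Int → List String
  | [], parts, start, _ =>
      parts ++ [String.ofList (PySem.Chars.strip (PySem.List.slice full (some start) none))]
  | (i, c) :: rest, parts, start, level =>
      if c = '{' then pvGoB full rest parts start (level + 1)
      else if c = '}' then pvGoB full rest parts start (level - 1)
      else if c = '|' ∧ level = 0 then
        pvGoB full rest
          (parts ++ [String.ofList (PySem.Chars.strip (PySem.List.slice full (some start) (some i)))])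
          (i + 1) level
      else pvGoB full rest parts start level

def split_content_by_pipe_py_alt (content : String) : List String :=
  pvGoB content.toList (PySem.List.enumerate content.toList 0) [] 0 0

-- ===== PRECONDITION & SPEC =====
def Spec_split_content_by_pipe_py (content : String) (out : List String) : Prop := out = split_content_by_pipe_py_alt content
instance (content : String) (out : List String) : Decidable (Spec_split_content_by_pipe_py content out) := by unfold Spec_split_content_by_pipe_py; infer_instance

-- ===== CLAIM (what is proved, stated in full; the proofs are below) =====
def Claim_equal_split_content_by_pipe_py : Prop := ∀ (content : String), Dom_split_content_by_pipe_py content → Spec_split_content_by_pipe_py content (split_content_by_pipe_py content)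

-- ===== LEMMAS AND PROOFS =====

-- A's accumulated current part is exactly the slice of the full string since the last boundary.
theorem pvGoA_eq_goB (cs : List Char) : ∀ (pre : List Char) (parts : List String) (lvl : Int) (s : Nat),
    s ≤ pre.length →
    pvGoA cs parts (pre.drop s) lvl
      = pvGoB (pre ++ cs) (PySem.List.enumerate cs (pre.length : Int)) parts (s : Int) lvl := by
  induction cs with
  | nil =>
      intro pre parts lvl s hs
      simp [pvGoA, pvGoB, PySem.List.enumerate, PySem.List.slice_from_natCast]
  | cons c cs ih =>
      intro pre parts lvl s hs
      rw [PySem.List.enumerate_cons]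
      have hd : List.drop s pre ++ [c] = List.drop s (pre ++ [c]) :=
        (List.drop_append_of_le_length hs).symm
      by_cases h1 : c = '{'
      · subst h1
        have h4 := ih (pre ++ ['{']) parts (lvl + 1) s (by simp; omega)
        simp only [pvGoA, pvGoB, hd]
        simpa using h4
      · by_cases h2 : c = '}'
        · subst h2
          have h4 := ih (pre ++ ['}']) parts (lvl - 1) s (by simp; omega)
          simp only [pvGoA, pvGoB, hd]
          simpa using h4
        · by_cases h3 : c = '|' ∧ lvl = 0
          · obtain ⟨hc, hl⟩ := h3
            subst hc; subst hl
            have hslice : PySem.List.slice (pre ++ '|' :: cs) (some (s : Int)) (some (pre.length : Int))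
                = pre.drop s := by
              rw [PySem.List.slice_natCast, List.drop_append_of_le_length hs]
              have hlen : (pre.drop s).length = pre.length - s := by simp
              rw [← hlen, List.take_left]
            have h4 := ih (pre ++ ['|'])
              (parts ++ [String.ofList (PySem.Chars.strip (pre.drop s))]) 0
              (pre.length + 1) (by simp)
            have hdrop : (pre ++ ['|']).drop (pre.length + 1) = [] := by simp
            rw [hdrop] at h4
            simp only [pvGoA, pvGoB, hslice]
            simp only [List.length_append, List.length_cons, List.length_nil] at h4
            push_cast at h4
            simpa using h4
          · have h4 := ih (pre ++ [c]) parts lvl s (by simp; omega)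
            simp only [pvGoA, pvGoB, hd, if_neg h1, if_neg h2, if_neg h3]
            simpa using h4

-- ===== VERDICT (by name: the statement is the Claim_ definition above) =====
theorem split_content_by_pipe_py_spec : Claim_equal_split_content_by_pipe_py := by
  intro content _
  unfold Spec_split_content_by_pipe_py split_content_by_pipe_py split_content_by_pipe_py_alt
  have h := pvGoA_eq_goB content.toList [] [] 0 0 (by simp)
  simpa using h
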